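-- pv_equiv track=rewrite | github.com/reillyowencooper/magweaver | src/decontaminate.py | rank_suspicion
-- ===== SOURCE A (Python) =====
-- from collections import defaultdict
--
-- def rank_suspicion(gc_list, cov_list, tax_list, tetra_list):
--     '''Weights suspicion of contigs based on how many lists they appear in'''
--     # This is probably the dumbest way to rank contigs,
--     # but I'm tired and can't think of anything better
--     sus_dict = defaultdict(int)
--     checked_items = []
--     for item in gc_list:
--         sus_dict[item] += 1
--         if item in cov_list:
--             sus_dict[item] += 1
--         elif item in tax_list:
--             sus_dict[item] += 1
--         elif item in tetra_list:
--             sus_dict[item] += 1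
--         checked_items.append(item)
--     updated_cov_list = [x for x in cov_list if x not in checked_items]
--     for item in updated_cov_list:
--         sus_dict[item] += 1
--         if item in tax_list:
--             sus_dict[item] += 1
--         elif item in tetra_list:
--             sus_dict[item] += 1
--         checked_items.append(item)
--     updated_tax_list = [x for x in tax_list if x not in checked_items]
--     for item in updated_tax_list:
--         sus_dict[item] += 1
--         if item in tetra_list:
--             sus_dict[item] += 1
--         checked_items.append(item)
--     updated_tetra_list = [x for x in tetra_list if x not in checked_items]
--     for item in updated_tetra_list:
--         sus_dict[item] += 1
--     return sus_dict
-- ===== SOURCE B (Python) =====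
-- from collections import defaultdict, Counter
--
-- def rank_suspicion(gc_list, cov_list, tax_list, tetra_list):
--     '''Weights suspicion of contigs based on how many lists they appear in'''
--     # Closed-form per key: each key is owned by the earliest list containing
--     # it; its score is (occurrences in that owner list) * (2 if it also
--     # appears in any strictly later list else 1).  Two staged passes: build
--     # the owner index, then assign each score once from precomputed Counters.
--     lists = [gc_list, cov_list, tax_list, tetra_list]
--     counts = [Counter(lst) for lst in lists]
--     owner = {}
--     for i, lst in enumerate(lists):
--         for item in lst:
--             owner.setdefault(item, i)
--     sus_dict = defaultdict(int)
--     for item, i in owner.items():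
--         bonus = any(item in counts[j] for j in range(i + 1, 4))
--         sus_dict[item] = counts[i][item] * (2 if bonus else 1)
--     return sus_dict
-- ===== Notes on version B (the rewrite author's own statement) =====
-- stated objective: faster
-- what changed: Replaces A's incremental += accumulation over four staged loops with rebuilt filtered lists by a closed-form per-key computation: precomputed Counters for each list, an owner index built with setdefault mapping each key to its earliest list, then one score assignment per key (owner count times a bonus factor).
import Mathlib
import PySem

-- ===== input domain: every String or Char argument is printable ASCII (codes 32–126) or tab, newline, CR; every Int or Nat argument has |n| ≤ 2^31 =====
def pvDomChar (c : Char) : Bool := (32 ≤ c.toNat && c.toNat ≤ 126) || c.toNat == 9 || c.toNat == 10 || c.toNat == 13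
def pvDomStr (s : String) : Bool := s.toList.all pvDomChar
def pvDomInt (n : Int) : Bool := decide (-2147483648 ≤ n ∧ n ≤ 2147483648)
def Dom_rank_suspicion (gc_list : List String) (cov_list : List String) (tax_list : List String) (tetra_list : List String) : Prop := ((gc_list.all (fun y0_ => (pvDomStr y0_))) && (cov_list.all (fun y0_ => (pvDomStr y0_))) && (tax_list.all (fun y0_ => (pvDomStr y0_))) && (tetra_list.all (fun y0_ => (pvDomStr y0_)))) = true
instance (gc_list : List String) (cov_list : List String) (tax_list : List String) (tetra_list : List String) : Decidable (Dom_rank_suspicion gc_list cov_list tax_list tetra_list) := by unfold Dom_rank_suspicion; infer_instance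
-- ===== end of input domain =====

-- B replaces A's incremental += accumulation over four staged loops by a closed-form per-key score
-- (Counters + earliest-owner index + one assignment per key); objective: faster (different algorithm; speedup measured).


-- ===== PORT A =====
def rank_suspicion (gc_list : List String) (cov_list : List String) (tax_list : List String) (tetra_list : List String) : List (String × Int) :=
  -- sus_dict = defaultdict(int); checked_items = []
  let st1 := gc_list.foldl
    (fun (st : PySem.Dict String Int × List String) item =>
      let d := st.1.modify item 0 (· + 1)
      let d := if cov_list.contains item then d.modify item 0 (· + 1)
        else if tax_list.contains item then d.modify item 0 (· + 1)
        else if tetra_list.contains item then d.modify item 0 (· + 1)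
        else d
      (d, st.2 ++ [item]))
    (PySem.Dict.empty, ([] : List String))
  let updated_cov_list := cov_list.filter (fun x => !(st1.2.contains x))
  let st2 := updated_cov_list.foldl
    (fun (st : PySem.Dict String Int × List String) item =>
      let d := st.1.modify item 0 (· + 1)
      let d := if tax_list.contains item then d.modify item 0 (· + 1)
        else if tetra_list.contains item then d.modify item 0 (· + 1)
        else d
      (d, st.2 ++ [item]))
    st1
  let updated_tax_list := tax_list.filter (fun x => !(st2.2.contains x))
  let st3 := updated_tax_list.foldl
    (fun (st : PySem.Dict String Int × List String) item =>
      let d := st.1.modify item 0 (· + 1)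
      let d := if tetra_list.contains item then d.modify item 0 (· + 1) else d
      (d, st.2 ++ [item]))
    st2
  let updated_tetra_list := tetra_list.filter (fun x => !(st3.2.contains x))
  let d4 := updated_tetra_list.foldl (fun (d : PySem.Dict String Int) item => d.modify item 0 (· + 1)) st3.1
  d4.items

-- ===== PORT B =====
def rank_suspicion_alt (gc_list : List String) (cov_list : List String) (tax_list : List String) (tetra_list : List String) : List (String × Int) :=
  let lists := [gc_list, cov_list, tax_list, tetra_list]
  -- counts = [Counter(lst) for lst in lists]
  let counts := lists.map (fun lst => PySem.Dict.counter lst)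
  -- owner: earliest list index containing each item, via setdefault
  let owner := (PySem.List.enumerate lists).foldl
    (fun (o : PySem.Dict String Int) p => p.2.foldl (fun o item => o.setdefault item p.1) o)
    PySem.Dict.empty
  -- one closed-form score per owned key
  let sus := owner.items.foldl
    (fun (d : PySem.Dict String Int) kv =>
      let bonus := (PySem.List.pyRange (kv.2 + 1) 4 1).any
        (fun j => (PySem.List.pyGetD counts j PySem.Dict.empty).contains kv.1)
      d.insert kv.1 ((PySem.List.pyGetD counts kv.2 PySem.Dict.empty).getD kv.1 0 * (if bonus then 2 else 1)))
    PySem.Dict.empty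
  sus.items

-- ===== PRECONDITION & SPEC =====
def Spec_rank_suspicion (gc_list : List String) (cov_list : List String) (tax_list : List String) (tetra_list : List String) (out : List (String × Int)) : Prop := out = rank_suspicion_alt gc_list cov_list tax_list tetra_list
instance (gc_list : List String) (cov_list : List String) (tax_list : List String) (tetra_list : List String) (out : List (String × Int)) : Decidable (Spec_rank_suspicion gc_list cov_list tax_list tetra_list out) := by unfold Spec_rank_suspicion; infer_instance

-- ===== CLAIM (what is proved, stated in full; the proofs are below) =====
def Claim_equal_rank_suspicion : Prop := ∀ (gc_list : List String) (cov_list : List String) (tax_list : List String) (tetra_list : List String), Dom_rank_suspicion gc_list cov_list tax_list tetra_list → Spec_rank_suspicion gc_list cov_list tax_list tetra_list (rank_suspicion gc_list cov_list tax_list tetra_list)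

-- ===== LEMMAS AND PROOFS =====

-- canonical building blocks for the two algorithms
def bump (c : String → Int) (l : List String) (d : PySem.Dict String Int) : PySem.Dict String Int :=
  l.foldl (fun d x => d.modify x 0 (· + c x)) d

def ownStage (i : Int) (l : List String) (o : PySem.Dict String Int) : PySem.Dict String Int :=
  l.foldl (fun o x => o.setdefault x i) o

def ownerD (gc cov tax tetra : List String) : PySem.Dict String Int :=
  ownStage 3 tetra (ownStage 2 tax (ownStage 1 cov (ownStage 0 gc PySem.Dict.empty)))

def fill (v : String × Int → Int) (l : List (String × Int)) (d : PySem.Dict String Int) : PySem.Dict String Int :=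
  l.foldl (fun d kv => d.insert kv.1 (v kv)) d

def scoreB (counts : List (PySem.Dict String Int)) (kv : String × Int) : Int :=
  (PySem.List.pyGetD counts kv.2 PySem.Dict.empty).getD kv.1 0 *
    (if (PySem.List.pyRange (kv.2 + 1) 4 1).any
        (fun j => (PySem.List.pyGetD counts j PySem.Dict.empty).contains kv.1) then 2 else 1)

theorem modify_twice (d : PySem.Dict String Int) (k : String) :
    (d.modify k 0 (· + 1)).modify k 0 (· + 1) = d.modify k 0 (· + 2) := by
  simp [PySem.Dict.modify, PySem.Dict.insert_insert_self, PySem.Dict.getD_insert_self]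
  ring_nf
theorem stageA1 (cov tax tetra l : List String) (d : PySem.Dict String Int) (c : List String) :
    l.foldl (fun (st : PySem.Dict String Int × List String) item =>
      (if cov.contains item then (st.1.modify item 0 (· + 1)).modify item 0 (· + 1)
       else if tax.contains item then (st.1.modify item 0 (· + 1)).modify item 0 (· + 1)
       else if tetra.contains item then (st.1.modify item 0 (· + 1)).modify item 0 (· + 1)
       else st.1.modify item 0 (· + 1), st.2 ++ [item])) (d, c)
    = (l.foldl (fun d item => d.modify item 0
        (· + (if cov.contains item || tax.contains item || tetra.contains item then 2 else 1))) d,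
       c ++ l) := by
  induction l generalizing d c with
  | nil => simp
  | cons x xs ih =>
    simp only [List.foldl_cons, ih, List.append_assoc, List.cons_append, List.nil_append]
    cases h1 : cov.contains x <;> cases h2 : tax.contains x <;> cases h3 : tetra.contains x <;>
      simp [modify_twice]
theorem stageA2 (tax tetra l : List String) (d : PySem.Dict String Int) (c : List String) :
    l.foldl (fun (st : PySem.Dict String Int × List String) item =>
      (if tax.contains item then (st.1.modify item 0 (· + 1)).modify item 0 (· + 1)
       else if tetra.contains item then (st.1.modify item 0 (· + 1)).modify item 0 (· + 1)
       else st.1.modify item 0 (· + 1), st.2 ++ [item])) (d, c)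
    = (l.foldl (fun d item => d.modify item 0
        (· + (if tax.contains item || tetra.contains item then 2 else 1))) d, c ++ l) := by
  induction l generalizing d c with
  | nil => simp
  | cons x xs ih =>
    simp only [List.foldl_cons, ih, List.append_assoc, List.cons_append, List.nil_append]
    cases h1 : tax.contains x <;> cases h2 : tetra.contains x <;> simp [modify_twice]
theorem stageA3 (tetra l : List String) (d : PySem.Dict String Int) (c : List String) :
    l.foldl (fun (st : PySem.Dict String Int × List String) item =>
      (if tetra.contains item then (st.1.modify item 0 (· + 1)).modify item 0 (· + 1)
       else st.1.modify item 0 (· + 1), st.2 ++ [item])) (d, c)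
    = (l.foldl (fun d item => d.modify item 0
        (· + (if tetra.contains item then 2 else 1))) d, c ++ l) := by
  induction l generalizing d c with
  | nil => simp
  | cons x xs ih =>
    simp only [List.foldl_cons, ih, List.append_assoc, List.cons_append, List.nil_append]
    cases h1 : tetra.contains x <;> simp [modify_twice]
theorem containsA2 (gc cov : List String) (x : String) :
    (gc ++ List.filter (fun y => !gc.contains y) cov).contains x = (gc.contains x || cov.contains x) := by
  rw [Bool.eq_iff_iff]
  simp [List.mem_append, List.mem_filter]
  tauto
theorem containsA3 (gc cov tax : List String) (x : String) :
    ((gc ++ List.filter (fun y => !gc.contains y) cov) ++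
      List.filter (fun y => !(gc.contains y || cov.contains y)) tax).contains x
    = (gc.contains x || cov.contains x || tax.contains x) := by
  rw [Bool.eq_iff_iff]
  simp [List.mem_append, List.mem_filter]
  tauto
theorem A_canon (gc cov tax tetra : List String) :
    rank_suspicion gc cov tax tetra =
      (bump (fun _ => 1) (tetra.filter (fun x => !(gc.contains x || cov.contains x || tax.contains x)))
        (bump (fun x => if tetra.contains x then 2 else 1) (tax.filter (fun x => !(gc.contains x || cov.contains x)))
          (bump (fun x => if tax.contains x || tetra.contains x then 2 else 1) (cov.filter (fun x => !gc.contains x))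
            (bump (fun x => if cov.contains x || tax.contains x || tetra.contains x then 2 else 1) gc
              PySem.Dict.empty)))).items := by
  simp only [rank_suspicion]
  rw [stageA1, stageA2, stageA3]
  simp only [List.nil_append]
  rw [List.filter_congr (fun x (_ : x ∈ tax) => congrArg Bool.not (containsA2 gc cov x))]
  rw [List.filter_congr (fun x (_ : x ∈ tetra) => congrArg Bool.not (containsA3 gc cov tax x))]
  rfl

-- B in canonical form
theorem B_canon (gc cov tax tetra : List String) :
    rank_suspicion_alt gc cov tax tetra =
      (fill (scoreB [PySem.Dict.counter gc, PySem.Dict.counter cov, PySem.Dict.counter tax, PySem.Dict.counter tetra])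
        (ownerD gc cov tax tetra).items PySem.Dict.empty).items := rfl

theorem getD_bump (c : String → Int) (l : List String) (d : PySem.Dict String Int) (k : String) :
    (bump c l d).getD k 0 = d.getD k 0 + c k * (l.count k : Int) := by
  induction l generalizing d with
  | nil => simp [bump]
  | cons x xs ih =>
    show (bump c xs (d.modify x 0 (· + c x))).getD k 0 = _
    rw [ih, PySem.Dict.getD_modify, List.count_cons]
    by_cases hkx : k = x
    · subst hkx; simp; ring
    · have hx : (x == k) = false := by simp [Ne.symm hkx]
      simp [hkx, hx]
theorem keys_bump (c : String → Int) (l : List String) (d : PySem.Dict String Int) :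
    (bump c l d).keys = PySem.Set.update d.keys l :=
  PySem.Dict.keys_foldl_modify l 0 (fun _ x v => v + c x) d
theorem count_filter' (p : String → Bool) (l : List String) (k : String) :
    ((l.filter p).count k : Int) = if p k then (l.count k : Int) else 0 := by
  by_cases h : p k
  · rw [List.count_filter (by simp [h])]; simp [h]
  · have : k ∉ l.filter p := fun hm => absurd (List.of_mem_filter hm) (by simp [h])
    simp [List.count_eq_zero.mpr this, h]
theorem update_filter (p : String → Bool) (l : List String) (s : PySem.Set String)
    (h : ∀ x ∈ l, p x = false → x ∈ s) :
    PySem.Set.update s (l.filter p) = PySem.Set.update s l := by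
  induction l generalizing s with
  | nil => simp
  | cons x xs ih =>
    by_cases hp : p x
    · rw [List.filter_cons_of_pos hp, PySem.Set.update_cons, PySem.Set.update_cons]
      exact ih (s.add x) (fun y hy hpy => (PySem.Set.mem_add _ _ _).mpr (Or.inl (h y (List.mem_cons_of_mem _ hy) hpy)))
    · rw [List.filter_cons_of_neg (by simp [hp]), PySem.Set.update_cons,
        PySem.Set.add_of_mem (h x List.mem_cons_self (by simp [hp]))]
      exact ih s (fun y hy hpy => h y (List.mem_cons_of_mem _ hy) hpy)
theorem keys_ownStage (i : Int) (l : List String) (o : PySem.Dict String Int) :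
    (ownStage i l o).keys = PySem.Set.update o.keys l := by
  induction l generalizing o with
  | nil => simp [ownStage]
  | cons x xs ih =>
    show (ownStage i xs (o.setdefault x i)).keys = _
    rw [PySem.Set.update_cons]
    by_cases hc : o.contains x
    · rw [PySem.Dict.setdefault_of_contains _ _ hc, ih,
        PySem.Set.add_of_mem ((PySem.Dict.contains_iff_mem_keys _ _).mp hc)]
    · rw [PySem.Dict.setdefault_of_not_contains _ _ (by simpa using hc), ih,
        PySem.Dict.keys_insert_of_not_contains _ _ (by simpa using hc),
        PySem.Set.add_of_not_mem (fun hm => hc ((PySem.Dict.contains_iff_mem_keys _ _).mpr hm))]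
theorem contains_ownStage (i : Int) (l : List String) (o : PySem.Dict String Int) (k : String) :
    (ownStage i l o).contains k = (o.contains k || l.contains k) := by
  induction l generalizing o with
  | nil => simp [ownStage]
  | cons x xs ih =>
    show (ownStage i xs (o.setdefault x i)).contains k = _
    rw [ih, PySem.Dict.contains_setdefault]
    by_cases hkx : k = x
    · subst hkx
      by_cases hc : o.contains k <;> simp [hc]
    · have hb : (k == x) = false := by simp [hkx]
      simp [hb, hkx]
theorem get?_ownStage (i : Int) (l : List String) (o : PySem.Dict String Int) (k : String) :
    (ownStage i l o).get? k =
      if o.contains k then o.get? k else if l.contains k then some i else none := by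
  induction l generalizing o with
  | nil =>
    show o.get? k = _
    by_cases hc : o.contains k
    · simp [hc]
    · simp [hc, (PySem.Dict.get?_eq_none_iff_contains o k).mpr (by simpa using hc)]
  | cons x xs ih =>
    show (ownStage i xs (o.setdefault x i)).get? k = _
    rw [ih]
    by_cases hcx : o.contains x
    · rw [PySem.Dict.setdefault_of_contains _ _ hcx]
      by_cases hc : o.contains k
      · simp [hc]
      · have hkx : k ≠ x := by intro h; rw [h] at hc; exact hc hcx
        simp [hc, List.contains_cons, beq_iff_eq, hkx]
    · rw [PySem.Dict.setdefault_of_not_contains _ _ (by simpa using hcx)]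
      by_cases hkx : k = x
      · subst hkx
        have hc : o.contains k = false := by simpa using hcx
        simp [PySem.Dict.contains_insert, PySem.Dict.get?_insert, hc, List.contains_cons]
      · by_cases hc : o.contains k <;>
          simp [PySem.Dict.contains_insert, PySem.Dict.get?_insert, beq_iff_eq, hkx, hc,
            List.contains_cons]
theorem keys_fill (v : String × Int → Int) (l : List (String × Int)) (d : PySem.Dict String Int) :
    (fill v l d).keys = PySem.Set.update d.keys (l.map Prod.fst) :=
  PySem.Dict.keys_foldl_insert_key l Prod.fst (fun _ kv => v kv) d
theorem getD_fill_not_mem (v : String × Int → Int) (l : List (String × Int)) (d : PySem.Dict String Int)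
    (k : String) (h : k ∉ l.map Prod.fst) : (fill v l d).getD k 0 = d.getD k 0 := by
  induction l generalizing d with
  | nil => rfl
  | cons kv xs ih =>
    show (fill v xs (d.insert kv.1 (v kv))).getD k 0 = _
    rw [ih _ (fun hm => h (by simp at hm ⊢; exact Or.inr hm)), PySem.Dict.getD_insert]
    have : k ≠ kv.1 := fun he => h (by simp [he])
    simp [this]
theorem getD_fill_mem (v : String × Int → Int) (l : List (String × Int)) (d : PySem.Dict String Int)
    (k : String) (i : Int) (h : (k, i) ∈ l) (hn : (l.map Prod.fst).Nodup) :
    (fill v l d).getD k 0 = v (k, i) := by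
  induction l generalizing d with
  | nil => cases h
  | cons kv xs ih =>
    show (fill v xs (d.insert kv.1 (v kv))).getD k 0 = _
    have hn' := hn
    rw [List.map_cons] at hn'
    obtain ⟨h1, h2⟩ := List.nodup_cons.mp hn'
    rcases List.mem_cons.mp h with he | hm
    · have hk : k ∉ xs.map Prod.fst := by have : k = kv.1 := congrArg Prod.fst he; rw [this]; exact h1
      rw [getD_fill_not_mem _ _ _ _ hk, PySem.Dict.getD_insert, ← he]
      simp
    · exact ih _ hm h2

theorem keys_ownerD (gc cov tax tetra : List String) :
    (ownerD gc cov tax tetra).keys =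
      PySem.Set.update (PySem.Set.update (PySem.Set.update (PySem.Set.ofList gc) cov) tax) tetra := by
  unfold ownerD
  rw [keys_ownStage, keys_ownStage, keys_ownStage, keys_ownStage, PySem.Dict.keys_empty]
  rfl

theorem nodup_keys_ownerD (gc cov tax tetra : List String) :
    (ownerD gc cov tax tetra).keys.Nodup := by
  rw [keys_ownerD]
  exact PySem.Set.nodup_update _ _ (PySem.Set.nodup_update _ _
    (PySem.Set.nodup_update _ _ (PySem.Set.nodup_ofList gc)))

theorem get?_ownerD (gc cov tax tetra : List String) (k : String) :
    (ownerD gc cov tax tetra).get? k =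
      if gc.contains k then some 0 else if cov.contains k then some 1
      else if tax.contains k then some 2 else if tetra.contains k then some 3 else none := by
  unfold ownerD
  rw [get?_ownStage, get?_ownStage, get?_ownStage, get?_ownStage]
  simp only [contains_ownStage, PySem.Dict.contains_empty]
  by_cases h1 : k ∈ gc <;> by_cases h2 : k ∈ cov <;> by_cases h3 : k ∈ tax <;>
    by_cases h4 : k ∈ tetra <;> simp [h1, h2, h3, h4, PySem.Dict.get?_empty]

theorem getD_B (gc cov tax tetra : List String) (v : String × Int → Int) (k : String)
    (hmem : k ∈ gc ∨ k ∈ cov ∨ k ∈ tax ∨ k ∈ tetra) :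
    (fill v (ownerD gc cov tax tetra).items PySem.Dict.empty).getD k 0 =
      if gc.contains k then v (k, 0) else if cov.contains k then v (k, 1)
      else if tax.contains k then v (k, 2) else v (k, 3) := by
  have hn : ((ownerD gc cov tax tetra).items.map Prod.fst).Nodup := nodup_keys_ownerD gc cov tax tetra
  by_cases h1 : k ∈ gc
  · have hg : (ownerD gc cov tax tetra).get? k = some 0 := by rw [get?_ownerD]; simp [h1]
    rw [getD_fill_mem v _ _ k 0 (PySem.Dict.mem_items_of_get?_eq_some _ hg) hn]
    simp [h1]
  · by_cases h2 : k ∈ cov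
    · have hg : (ownerD gc cov tax tetra).get? k = some 1 := by rw [get?_ownerD]; simp [h1, h2]
      rw [getD_fill_mem v _ _ k 1 (PySem.Dict.mem_items_of_get?_eq_some _ hg) hn]
      simp [h1, h2]
    · by_cases h3 : k ∈ tax
      · have hg : (ownerD gc cov tax tetra).get? k = some 2 := by rw [get?_ownerD]; simp [h1, h2, h3]
        rw [getD_fill_mem v _ _ k 2 (PySem.Dict.mem_items_of_get?_eq_some _ hg) hn]
        simp [h1, h2, h3]
      · have h4 : k ∈ tetra := by tauto
        have hg : (ownerD gc cov tax tetra).get? k = some 3 := by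
          rw [get?_ownerD]; simp [h1, h2, h3, h4]
        rw [getD_fill_mem v _ _ k 3 (PySem.Dict.mem_items_of_get?_eq_some _ hg) hn]
        simp [h1, h2, h3]

theorem A_getD (gc cov tax tetra : List String) (k : String) :
    (bump (fun _ => 1) (tetra.filter (fun x => !(gc.contains x || cov.contains x || tax.contains x)))
      (bump (fun x => if tetra.contains x then 2 else 1) (tax.filter (fun x => !(gc.contains x || cov.contains x)))
        (bump (fun x => if tax.contains x || tetra.contains x then 2 else 1) (cov.filter (fun x => !gc.contains x))
          (bump (fun x => if cov.contains x || tax.contains x || tetra.contains x then 2 else 1) gc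
            PySem.Dict.empty)))).getD k 0 =
      if gc.contains k then (if cov.contains k || tax.contains k || tetra.contains k then 2 else 1) * (gc.count k : Int)
      else if cov.contains k then (if tax.contains k || tetra.contains k then 2 else 1) * (cov.count k : Int)
      else if tax.contains k then (if tetra.contains k then 2 else 1) * (tax.count k : Int)
      else (tetra.count k : Int) := by
  rw [getD_bump, getD_bump, getD_bump, getD_bump, PySem.Dict.getD_empty,
    count_filter', count_filter', count_filter']
  by_cases h1 : k ∈ gc <;> by_cases h2 : k ∈ cov <;> by_cases h3 : k ∈ tax <;>
    simp [h1, h2, h3, List.count_eq_zero_of_not_mem] <;> ring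

theorem keys_A (gc cov tax tetra : List String) :
    (bump (fun _ => 1) (tetra.filter (fun x => !(gc.contains x || cov.contains x || tax.contains x)))
      (bump (fun x => if tetra.contains x then 2 else 1) (tax.filter (fun x => !(gc.contains x || cov.contains x)))
        (bump (fun x => if tax.contains x || tetra.contains x then 2 else 1) (cov.filter (fun x => !gc.contains x))
          (bump (fun x => if cov.contains x || tax.contains x || tetra.contains x then 2 else 1) gc
            PySem.Dict.empty)))).keys =
      PySem.Set.update (PySem.Set.update (PySem.Set.update (PySem.Set.ofList gc) cov) tax) tetra := by
  rw [keys_bump, keys_bump, keys_bump, keys_bump, PySem.Dict.keys_empty]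
  have hu : ∀ xs : List String, PySem.Set.update ([] : PySem.Set String) xs = PySem.Set.ofList xs := fun _ => rfl
  rw [hu]
  rw [update_filter _ cov _ (fun x _ hp => by
    simp at hp
    simp [PySem.Set.mem_ofList, hp])]
  rw [update_filter _ tax _ (fun x _ hp => by
    simp at hp
    simp [PySem.Set.mem_update, PySem.Set.mem_ofList]
    tauto)]
  rw [update_filter _ tetra _ (fun x _ hp => by
    simp at hp
    simp [PySem.Set.mem_update, PySem.Set.mem_ofList]
    tauto)]

-- ===== VERDICT (by name: the statement is the Claim_ definition above) =====
theorem rank_suspicion_spec : Claim_equal_rank_suspicion := by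
  intro gc cov tax tetra _
  show rank_suspicion gc cov tax tetra = rank_suspicion_alt gc cov tax tetra
  rw [A_canon, B_canon]
  have hKA := keys_A gc cov tax tetra
  have hKB : (fill (scoreB [PySem.Dict.counter gc, PySem.Dict.counter cov, PySem.Dict.counter tax, PySem.Dict.counter tetra])
      (ownerD gc cov tax tetra).items PySem.Dict.empty).keys =
      PySem.Set.update (PySem.Set.update (PySem.Set.update (PySem.Set.ofList gc) cov) tax) tetra := by
    rw [keys_fill, PySem.Dict.keys_empty]
    have hu : ∀ xs : List String, PySem.Set.update ([] : PySem.Set String) xs = PySem.Set.ofList xs := fun _ => rfl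
    rw [hu]
    have he : (ownerD gc cov tax tetra).items.map Prod.fst = (ownerD gc cov tax tetra).keys := rfl
    rw [he, PySem.Set.ofList_eq_self_of_nodup _ (nodup_keys_ownerD gc cov tax tetra),
      keys_ownerD]
  have hnodK : (PySem.Set.update (PySem.Set.update (PySem.Set.update (PySem.Set.ofList gc) cov) tax) tetra).Nodup :=
    PySem.Set.nodup_update _ _ (PySem.Set.nodup_update _ _
      (PySem.Set.nodup_update _ _ (PySem.Set.nodup_ofList gc)))
  rw [PySem.Dict.items_eq_map_keys _ (hKA ▸ hnodK) 0,
    PySem.Dict.items_eq_map_keys _ (hKB ▸ hnodK) 0, hKA, hKB]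
  apply List.map_congr_left
  intro k hk
  have hmem : k ∈ gc ∨ k ∈ cov ∨ k ∈ tax ∨ k ∈ tetra := by
    simpa [PySem.Set.mem_update, PySem.Set.mem_ofList, or_assoc] using hk
  rw [Prod.mk.injEq]
  refine ⟨rfl, ?_⟩
  rw [A_getD, getD_B gc cov tax tetra _ k hmem]
  have hr1 : PySem.List.pyRange (1 : Int) 4 1 = [1, 2, 3] := by decide
  have hr2 : PySem.List.pyRange (2 : Int) 4 1 = [2, 3] := by decide
  have hr3 : PySem.List.pyRange (3 : Int) 4 1 = [3] := by decide
  have hr4 : PySem.List.pyRange (4 : Int) 4 1 = ([] : List Int) := by decide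
  by_cases h1 : k ∈ gc <;> by_cases h2 : k ∈ cov <;> by_cases h3 : k ∈ tax <;>
    simp [h1, h2, h3, scoreB, hr1, hr2, hr3, hr4, PySem.List.pyGetD_ofNat',
      PySem.Dict.contains_counter, PySem.Dict.getD_counter, List.count_eq_zero_of_not_mem] <;> ring
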